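-- pv_equiv track=rewrite | github.com/Maius02/entrega2 | src/functions.py | validar_nombre
-- ===== SOURCE A (Python) =====
-- def validar_nombre(nombre):
--     """punto 4: devuelve true si el nombre cumple las condiciones
--         Al menos 5 caracteres.
--         Contiene al menos un número.
--         Contiene al menos una letra mayúscula.
--         Solo puede contener letras y números.
--
--         .isalnum() # verificar si una cadena solo contiene caracteres alfanuméricos (letras y números) (return boolean)
--         any() # evalúa un iterable (como una lista o generador) y devuelve True si al menos un elemento es True
--     """
--     if not len(nombre) >= 5:
--         return False
--     if not nombre.isalnum():
--         return False
--     if not any(char.isdigit() for char in nombre):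
--         return False
--     if not any(char.isupper() for char in nombre):
--         return False
--     return True
-- ===== SOURCE B (Python) =====
-- def validar_nombre(nombre):
--     """Single pass: one loop over the characters maintains three flags
--     instead of three separate scans."""
--     if len(nombre) < 5:
--         return False
--     todo_alnum = True
--     hay_digito = False
--     hay_mayus = False
--     for char in nombre:
--         if not char.isalnum():
--             todo_alnum = False
--         if char.isdigit():
--             hay_digito = True
--         if char.isupper():
--             hay_mayus = True
--     return todo_alnum and hay_digito and hay_mayus
-- ===== Notes on version B (the rewrite author's own statement) =====
-- stated objective: simpler
-- what changed: Replaced the early-return chain with isalnum() plus two any() generator scans by a single loop over the characters maintaining three flags (all-alnum, has-digit, has-uppercase), combined at the end.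
import Mathlib
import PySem

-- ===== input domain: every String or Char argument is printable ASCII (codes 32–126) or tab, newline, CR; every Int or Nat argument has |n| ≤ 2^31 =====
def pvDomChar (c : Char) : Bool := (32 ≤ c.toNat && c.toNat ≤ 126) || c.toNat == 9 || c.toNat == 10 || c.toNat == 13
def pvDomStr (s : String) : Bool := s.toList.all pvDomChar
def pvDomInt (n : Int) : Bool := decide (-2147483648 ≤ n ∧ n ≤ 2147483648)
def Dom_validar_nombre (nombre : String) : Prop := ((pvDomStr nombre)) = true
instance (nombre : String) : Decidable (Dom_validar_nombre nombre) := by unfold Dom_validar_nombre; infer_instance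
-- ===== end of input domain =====

-- B replaces A's three separate scans (isalnum + two any() generators) by one single-pass fold keeping three flags; objective: simpler.


-- ===== PORT A =====
-- literal port of A: length guard, isalnum, any(isdigit), any(isupper)
def validar_nombre (nombre : String) : Bool :=
  if ¬ (PySem.Str.len nombre ≥ 5) then false
  else if ¬ (PySem.Str.strIsalnum nombre = true) then false
  else if ¬ (nombre.toList.any (fun char => PySem.Chars.isdigit char) = true) then false
  else if ¬ (nombre.toList.any (fun char => PySem.Chars.isupper char) = true) then false
  else true

-- ===== PORT B =====
-- port of B: one fold over the characters carrying the three flags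
def validar_nombre_alt (nombre : String) : Bool :=
  if PySem.Str.len nombre < 5 then false
  else
    let st := nombre.toList.foldl
      (fun (st : Bool × Bool × Bool) char =>
        (st.1 && PySem.Chars.isalnum char,
         st.2.1 || PySem.Chars.isdigit char,
         st.2.2 || PySem.Chars.isupper char))
      (true, false, false)
    st.1 && st.2.1 && st.2.2

-- ===== PRECONDITION & SPEC =====
def Spec_validar_nombre (nombre : String) (out : Bool) : Prop := out = validar_nombre_alt nombre
instance (nombre : String) (out : Bool) : Decidable (Spec_validar_nombre nombre out) := by unfold Spec_validar_nombre; infer_instance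

-- ===== CLAIM (what is proved, stated in full; the proofs are below) =====
def Claim_equal_validar_nombre : Prop := ∀ (nombre : String), Dom_validar_nombre nombre → Spec_validar_nombre nombre (validar_nombre nombre)

-- ===== LEMMAS AND PROOFS =====

-- ===== VERDICT (by name: the statement is the Claim_ definition above) =====
lemma flags_fold (l : List Char) (a d u : Bool) :
    l.foldl
      (fun (st : Bool × Bool × Bool) char =>
        (st.1 && PySem.Chars.isalnum char,
         st.2.1 || PySem.Chars.isdigit char,
         st.2.2 || PySem.Chars.isupper char))
      (a, d, u)
    = (a && l.all PySem.Chars.isalnum,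
       d || l.any PySem.Chars.isdigit,
       u || l.any PySem.Chars.isupper) := by
  induction l generalizing a d u with
  | nil => simp
  | cons c t ih => simp [ih, Bool.and_assoc, Bool.or_assoc]

lemma main_list (l : List Char) :
    (if ¬ ((l.length : Int) ≥ 5) then false
     else if ¬ ((!l.isEmpty && l.all PySem.Chars.isalnum) = true) then false
     else if ¬ (l.any (fun char => PySem.Chars.isdigit char) = true) then false
     else if ¬ (l.any (fun char => PySem.Chars.isupper char) = true) then false
     else true)
    = (if (l.length : Int) < 5 then false
       else true && l.all PySem.Chars.isalnum && (false || l.any PySem.Chars.isdigit)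
            && (false || l.any PySem.Chars.isupper)) := by
  by_cases h5 : (5 : Int) ≤ (l.length : Int)
  · have hne : l.isEmpty = false := by
      cases l with
      | nil => simp at h5
      | cons c t => simp
    simp only [ge_iff_le, h5, not_true_eq_false, if_false, not_lt.mpr h5,
      hne, Bool.not_false, Bool.true_and, Bool.false_or]
    split_ifs <;> simp_all
  · simp [not_le.mp h5, h5]

theorem validar_nombre_spec : Claim_equal_validar_nombre := by
  intro nombre _
  unfold Spec_validar_nombre validar_nombre validar_nombre_alt
  simp only [flags_fold, PySem.Str.strIsalnum_eq, PySem.Chars.strIsalnum,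
    PySem.Str.len]
  exact main_list nombre.toList
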